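-- pv_equiv track=rewrite | github.com/thinkSharp/Interviews | account_merge.py | accountsMerge1
-- ===== SOURCE A (Python) =====
-- import collections
--
-- def accountsMerge1(accounts):
--     graph = collections.defaultdict(set)
--     em_to_name = {}
--     for account in accounts:
--         name = account[0]
--         for email in account[1:]:
--             graph[account[1]].add(email)
--             graph[email].add(account[1])
--             em_to_name[email] = name
--
--     seen = set()
--     answer = []
--     stack = collections.deque()
--     for email in graph:
--         if email in seen:
--             continue
--
--         seen.add(email)
--         stack.append(email)
--         component = []
--         while stack:
--             item = stack.pop()
--             component.append(item)
--             for new_email in graph[item]: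
--                 if new_email not in seen:
--                     seen.add(new_email)
--                     stack.append(new_email)
--         answer.append([em_to_name[email]] + sorted(component))
--
--     return answer
-- ===== SOURCE B (Python) =====
-- def accountsMerge1(accounts):
--     # edge-list + iterate-to-fixpoint closure instead of adjacency dict + DFS stack
--     edges = []
--     order = []
--     in_order = set()
--     name_of = {}
--     for account in accounts:
--         name = account[0]
--         for email in account[1:]:
--             hub = account[1]
--             edges.append((hub, email))
--             for z in (hub, email):
--                 if z not in in_order:
--                     in_order.add(z)
--                     order.append(z)
--             name_of[email] = name
--
--     def closure(e):
--         comp = {e}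
--         while True:
--             grew = False
--             for a, b in edges:
--                 if a in comp and b not in comp:
--                     comp.add(b)
--                     grew = True
--                 if b in comp and a not in comp:
--                     comp.add(a)
--                     grew = True
--             if not grew:
--                 break
--         return comp
--
--     answer = []
--     done = set()
--     for email in order:
--         if email in done:
--             continue
--         comp = closure(email)
--         done |= comp
--         answer.append([name_of[email]] + sorted(comp))
--     return answer
-- ===== Notes on version B (the rewrite author's own statement) =====
-- stated objective: alternative
-- what changed: Replaces A's adjacency-dict-of-sets plus explicit-stack DFS with a flat undirected edge list and a semi-naive iterate-until-fixpoint closure per component (trading speed on large graphs for a much simpler data layout); component order, name choice and sorting are preserved.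
import Mathlib
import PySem

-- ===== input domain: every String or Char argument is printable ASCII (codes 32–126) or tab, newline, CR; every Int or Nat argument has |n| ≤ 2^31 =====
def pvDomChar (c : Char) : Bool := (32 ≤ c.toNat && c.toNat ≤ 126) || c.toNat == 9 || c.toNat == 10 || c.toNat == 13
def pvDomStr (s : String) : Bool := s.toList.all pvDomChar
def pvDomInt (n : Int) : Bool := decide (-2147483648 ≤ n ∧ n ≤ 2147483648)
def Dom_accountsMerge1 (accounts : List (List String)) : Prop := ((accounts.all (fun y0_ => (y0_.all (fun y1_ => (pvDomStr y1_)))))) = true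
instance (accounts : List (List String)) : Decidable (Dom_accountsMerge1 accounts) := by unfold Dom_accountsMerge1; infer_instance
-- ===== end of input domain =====

-- B replaces A's adjacency-dict + explicit-stack DFS by a flat edge list with an
-- iterate-until-fixpoint closure per component (alternative algorithm, not faster).

-- ===== PORT A =====
-- build loop: graph[account[1]].add(email); graph[email].add(account[1]); em_to_name[email] = name
def pvGraphStep (st : PySem.Dict String (PySem.Set String) × PySem.Dict String String)
    (account : List String) :
    PySem.Dict String (PySem.Set String) × PySem.Dict String String :=
  let name := PySem.List.pyGetD account 0 ""
  (PySem.List.slice account (some 1) none).foldl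
    (fun st email =>
      let hub := PySem.List.pyGetD account 1 ""
      let g := st.1.modify hub [] (fun s => PySem.Set.add s email)
      let g := g.modify email [] (fun s => PySem.Set.add s hub)
      (g, st.2.insert email name))
    st

-- the `while stack:` DFS loop; stack as a cons-list (push/pop at the head = deque append/pop
-- at the right); fuel makes the loop total, `size+1` is proved sufficient below
def pvDfs (g : PySem.Dict String (PySem.Set String)) :
    Nat → List String → PySem.Set String → List String → PySem.Set String × List String
  | 0, _, seen, comp => (seen, comp)
  | _ + 1, [], seen, comp => (seen, comp)
  | fuel + 1, item :: rest, seen, comp =>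
      let comp' := comp ++ [item]
      let st := (g.getD item []).foldl
        (fun (p : PySem.Set String × List String) ne =>
          if PySem.Set.contains p.1 ne then p else (PySem.Set.add p.1 ne, ne :: p.2))
        (seen, rest)
      pvDfs g fuel st.2 st.1 comp'

def accountsMerge1 (accounts : List (List String)) : List (List String) :=
  let built := accounts.foldl pvGraphStep (PySem.Dict.empty, PySem.Dict.empty)
  (built.1.keys.foldl
    (fun (st : PySem.Set String × List (List String)) email =>
      if PySem.Set.contains st.1 email then st
      else
        let r := pvDfs built.1 (built.1.size + 1) [email] (PySem.Set.add st.1 email) []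
        (r.1, st.2 ++ [built.2.getD email "" :: PySem.List.sorted r.2 (fun x => x)]))
    (PySem.Set.empty, [])).2

-- ===== PORT B =====
-- build loop: edges.append((hub, email)); order kept as first-insertion set; name_of[email] = name
def pvBuildStep
    (st : List (String × String) × PySem.Set String × PySem.Dict String String)
    (account : List String) :
    List (String × String) × PySem.Set String × PySem.Dict String String :=
  let name := PySem.List.pyGetD account 0 ""
  (PySem.List.slice account (some 1) none).foldl
    (fun st email =>
      let hub := PySem.List.pyGetD account 1 ""
      (st.1 ++ [(hub, email)],
       PySem.Set.add (PySem.Set.add st.2.1 hub) email,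
       st.2.2.insert email name))
    st

-- one `for a, b in edges:` pass of the closure loop; the Bool is the `grew` flag
def pvPass (edges : List (String × String)) (comp : PySem.Set String) :
    PySem.Set String × Bool :=
  edges.foldl
    (fun (p : PySem.Set String × Bool) e =>
      let p := if PySem.Set.contains p.1 e.1 && !PySem.Set.contains p.1 e.2 then
                 (PySem.Set.add p.1 e.2, true) else p
      if PySem.Set.contains p.1 e.2 && !PySem.Set.contains p.1 e.1 then
        (PySem.Set.add p.1 e.1, true) else p)
    (comp, false)

-- the `while True: … if not grew: break` loop; fuel = len(order) is proved sufficient below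
def pvClosure (edges : List (String × String)) :
    Nat → PySem.Set String → PySem.Set String
  | 0, comp => comp
  | fuel + 1, comp =>
      let r := pvPass edges comp
      if r.2 then pvClosure edges fuel r.1 else comp

def accountsMerge1_alt (accounts : List (List String)) : List (List String) :=
  let b := accounts.foldl pvBuildStep ([], PySem.Set.empty, PySem.Dict.empty)
  (b.2.1.foldl
    (fun (st : PySem.Set String × List (List String)) email =>
      if PySem.Set.contains st.1 email then st
      else
        let comp := pvClosure b.1 b.2.1.length (PySem.Set.ofList [email])
        (PySem.Set.union st.1 comp,
         st.2 ++ [b.2.2.getD email "" :: PySem.List.sorted comp (fun x => x)]))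
    (PySem.Set.empty, [])).2

-- ===== PRECONDITION & SPEC =====
-- Pre_ excludes exactly the inputs containing an empty account, on which A (and B) raise
-- IndexError at `account[0]`.
def Pre_accountsMerge1 (accounts : List (List String)) : Prop :=
  ∀ a ∈ accounts, a ≠ []
instance (accounts : List (List String)) : Decidable (Pre_accountsMerge1 accounts) := by
  unfold Pre_accountsMerge1; infer_instance

def pvWitness_accountsMerge1 : List (List String) :=
  [["X", "a", "b"], ["Y", "b", "c"], ["Z", "d"]]

def Spec_accountsMerge1 (accounts : List (List String)) (out : List (List String)) : Prop :=
  out = accountsMerge1_alt accounts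
instance (accounts : List (List String)) (out : List (List String)) :
    Decidable (Spec_accountsMerge1 accounts out) := by unfold Spec_accountsMerge1; infer_instance

-- ===== CLAIM (what is proved, stated in full; the proofs are below) =====
def Claim_equal_accountsMerge1 : Prop :=
  ∀ (accounts : List (List String)), Dom_accountsMerge1 accounts →
    Pre_accountsMerge1 accounts →
    Spec_accountsMerge1 accounts (accountsMerge1 accounts)

-- ===== LEMMAS AND PROOFS =====

-- canonical edge list both builds produce
def pvEdgesL (accounts : List (List String)) : List (String × String) :=
  accounts.flatMap (fun a =>
    (PySem.List.slice a (some 1) none).map (fun em => (PySem.List.pyGetD a 1 "", em)))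

-- name-dict step shared by both builds
def pvNameStep (n : PySem.Dict String String) (account : List String) :
    PySem.Dict String String :=
  (PySem.List.slice account (some 1) none).foldl
    (fun n email => n.insert email (PySem.List.pyGetD account 0 "")) n

def pvGStep (g : PySem.Dict String (PySem.Set String)) (p : String × String) :
    PySem.Dict String (PySem.Set String) :=
  (g.modify p.1 [] (fun s => PySem.Set.add s p.2)).modify p.2 [] (fun s => PySem.Set.add s p.1)

def pvOStep (o : PySem.Set String) (p : String × String) : PySem.Set String :=
  PySem.Set.add (PySem.Set.add o p.1) p.2

def pvAdjP (es : List (String × String)) (x y : String) : Prop :=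
  ∃ p ∈ es, (p.1 = x ∧ p.2 = y) ∨ (p.1 = y ∧ p.2 = x)

def pvReach (es : List (String × String)) : String → String → Prop :=
  Relation.ReflTransGen (pvAdjP es)

def pvMu (K seen : List String) : Nat :=
  (K.filter (fun k => !seen.contains k)).length

def pvPushStep (p : PySem.Set String × List String) (ne : String) :
    PySem.Set String × List String :=
  if PySem.Set.contains p.1 ne then p else (PySem.Set.add p.1 ne, ne :: p.2)

def pvPStep (p : PySem.Set String × Bool) (e : String × String) :
    PySem.Set String × Bool :=
  let p := if PySem.Set.contains p.1 e.1 && !PySem.Set.contains p.1 e.2 then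
             (PySem.Set.add p.1 e.2, true) else p
  if PySem.Set.contains p.1 e.2 && !PySem.Set.contains p.1 e.1 then
    (PySem.Set.add p.1 e.1, true) else p

theorem pv_pass_eq (es : List (String × String)) (comp : PySem.Set String) :
    pvPass es comp = es.foldl pvPStep (comp, false) := rfl

theorem pv_dfs_step (g : PySem.Dict String (PySem.Set String)) (fuel : Nat)
    (item : String) (rest : List String) (seen : PySem.Set String) (comp : List String) :
    pvDfs g (fuel + 1) (item :: rest) seen comp
      = pvDfs g fuel ((g.getD item []).foldl pvPushStep (seen, rest)).2
          ((g.getD item []).foldl pvPushStep (seen, rest)).1 (comp ++ [item]) := rfl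

-- ---- decomposition of the two build folds ----

theorem pv_decompA_inner (l : List String) (hub name : String) :
    ∀ (g : PySem.Dict String (PySem.Set String)) (n : PySem.Dict String String),
    l.foldl (fun st email =>
        let g := st.1.modify hub [] (fun s => PySem.Set.add s email)
        let g := g.modify email [] (fun s => PySem.Set.add s hub)
        (g, st.2.insert email name)) (g, n)
      = ((l.map (fun em => (hub, em))).foldl pvGStep g,
         l.foldl (fun n em => n.insert em name) n) := by
  induction l with
  | nil => intro g n; simp
  | cons a t ih =>
      intro g n
      simp only [List.foldl_cons, List.map_cons]
      rw [ih]
      rfl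


theorem pv_decompA (accounts : List (List String)) :
    ∀ (g : PySem.Dict String (PySem.Set String)) (n : PySem.Dict String String),
    accounts.foldl pvGraphStep (g, n)
      = ((pvEdgesL accounts).foldl pvGStep g, accounts.foldl pvNameStep n) := by
  induction accounts with
  | nil => intro g n; simp [pvEdgesL]
  | cons a t ih =>
      intro g n
      simp only [List.foldl_cons]
      have hstep : pvGraphStep (g, n) a
          = (((PySem.List.slice a (some 1) none).map (fun em => (PySem.List.pyGetD a 1 "", em))).foldl pvGStep g,
             (PySem.List.slice a (some 1) none).foldl
               (fun n em => n.insert em (PySem.List.pyGetD a 0 "")) n) := by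
        unfold pvGraphStep
        exact pv_decompA_inner _ _ _ g n
      rw [hstep, ih]
      simp [pvEdgesL, pvNameStep, List.foldl_append]


theorem pv_decompB_inner (l : List String) (hub name : String) :
    ∀ (es : List (String × String)) (o : PySem.Set String) (n : PySem.Dict String String),
    l.foldl (fun st email =>
        (st.1 ++ [(hub, email)],
         PySem.Set.add (PySem.Set.add st.2.1 hub) email,
         st.2.2.insert email name)) (es, o, n)
      = (es ++ l.map (fun em => (hub, em)),
         (l.map (fun em => (hub, em))).foldl pvOStep o,
         l.foldl (fun n em => n.insert em name) n) := by
  induction l with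
  | nil => intro es o n; simp
  | cons a t ih =>
      intro es o n
      simp only [List.foldl_cons, List.map_cons]
      rw [ih]
      simp [pvOStep, List.append_assoc]


theorem pv_decompB (accounts : List (List String)) :
    ∀ (es : List (String × String)) (o : PySem.Set String) (n : PySem.Dict String String),
    accounts.foldl pvBuildStep (es, o, n)
      = (es ++ pvEdgesL accounts,
         (pvEdgesL accounts).foldl pvOStep o,
         accounts.foldl pvNameStep n) := by
  induction accounts with
  | nil => intro es o n; simp [pvEdgesL]
  | cons a t ih =>
      intro es o n
      simp only [List.foldl_cons]
      have hstep : pvBuildStep (es, o, n) a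
          = (es ++ (PySem.List.slice a (some 1) none).map (fun em => (PySem.List.pyGetD a 1 "", em)),
             ((PySem.List.slice a (some 1) none).map (fun em => (PySem.List.pyGetD a 1 "", em))).foldl pvOStep o,
             (PySem.List.slice a (some 1) none).foldl
               (fun n em => n.insert em (PySem.List.pyGetD a 0 "")) n) := by
        unfold pvBuildStep
        exact pv_decompB_inner _ _ _ es o n
      rw [hstep, ih]
      simp [pvEdgesL, pvNameStep, List.foldl_append, List.append_assoc]


-- ---- graph-fold characterization ----

theorem pv_gstep_getD_mem (g : PySem.Dict String (PySem.Set String)) (p : String × String)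
    (x y : String) :
    y ∈ (pvGStep g p).getD x [] ↔
      y ∈ g.getD x [] ∨ (p.1 = x ∧ p.2 = y) ∨ (p.2 = x ∧ p.1 = y) := by
  unfold pvGStep
  simp only [PySem.Dict.getD_modify]
  by_cases h2 : x = p.2 <;> by_cases h1 : x = p.1 <;> by_cases h12 : p.1 = p.2 <;>
    simp [h1, h2, h12, PySem.Set.mem_add, eq_comm]


theorem pv_gfold_getD_mem (es : List (String × String)) :
    ∀ (g : PySem.Dict String (PySem.Set String)) (x y : String),
    y ∈ (es.foldl pvGStep g).getD x [] ↔ y ∈ g.getD x [] ∨ pvAdjP es x y := by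
  induction es with
  | nil => intro g x y; simp [pvAdjP]
  | cons p t ih =>
      intro g x y
      simp only [List.foldl_cons]
      rw [ih, pv_gstep_getD_mem]
      constructor
      · rintro ((h | h) | h)
        · exact Or.inl h
        · exact Or.inr ⟨p, by simp, by tauto⟩
        · rcases h with ⟨q, hq, hh⟩
          exact Or.inr ⟨q, by simp [hq], hh⟩
      · rintro (h | ⟨q, hq, hh⟩)
        · exact Or.inl (Or.inl h)
        · rcases List.mem_cons.mp hq with rfl | hq
          · exact Or.inl (Or.inr (by tauto))
          · exact Or.inr ⟨q, hq, hh⟩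


theorem pv_gfold_getD_nodup (es : List (String × String)) :
    ∀ (g : PySem.Dict String (PySem.Set String)),
    (∀ x, (g.getD x []).Nodup) → ∀ x, ((es.foldl pvGStep g).getD x []).Nodup := by
  induction es with
  | nil => intro g h x; exact h x
  | cons p t ih =>
      intro g h x
      refine ih _ (fun z => ?_) x
      unfold pvGStep
      simp only [PySem.Dict.getD_modify]
      split_ifs <;>
        first
          | exact PySem.Set.nodup_add _ _ (PySem.Set.nodup_add _ _ (h _))
          | exact PySem.Set.nodup_add _ _ (h _)
          | exact h _


theorem pv_keys_modify_add (d : PySem.Dict String (PySem.Set String)) (k : String)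
    (f : PySem.Set String → PySem.Set String) :
    (d.modify k [] f).keys = PySem.Set.add d.keys k := by
  rw [PySem.Dict.keys_modify]
  by_cases h : k ∈ d.keys
  · rw [PySem.Dict.keys_insert_of_contains _ _ ((PySem.Dict.contains_iff_mem_keys d k).mpr h)]
    exact (PySem.Set.add_of_mem h).symm
  · rw [PySem.Dict.keys_insert_of_not_contains _ _
      (by
        cases hc : d.contains k
        · rfl
        · exact absurd ((PySem.Dict.contains_iff_mem_keys d k).mp hc) h)]
    exact (PySem.Set.add_of_not_mem h).symm


theorem pv_gfold_keys (es : List (String × String)) :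
    ∀ (g : PySem.Dict String (PySem.Set String)),
    (es.foldl pvGStep g).keys = es.foldl pvOStep g.keys := by
  induction es with
  | nil => intro g; simp
  | cons p t ih =>
      intro g
      simp only [List.foldl_cons]
      rw [ih]
      have : (pvGStep g p).keys = pvOStep g.keys p := by
        unfold pvGStep pvOStep
        rw [pv_keys_modify_add, pv_keys_modify_add]
      rw [this]


theorem pv_ofold_mem (es : List (String × String)) :
    ∀ (o : PySem.Set String) (x : String),
    x ∈ es.foldl pvOStep o ↔ x ∈ o ∨ ∃ p ∈ es, x = p.1 ∨ x = p.2 := by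
  induction es with
  | nil => intro o x; simp
  | cons p t ih =>
      intro o x
      simp only [List.foldl_cons]
      rw [ih]
      unfold pvOStep
      rw [PySem.Set.mem_add, PySem.Set.mem_add]
      constructor
      · rintro (((h | h) | h) | ⟨q, hq, hh⟩)
        · exact Or.inl h
        · exact Or.inr ⟨p, by simp, Or.inl h⟩
        · exact Or.inr ⟨p, by simp, Or.inr h⟩
        · exact Or.inr ⟨q, by simp [hq], hh⟩
      · rintro (h | ⟨q, hq, hh⟩)
        · exact Or.inl (Or.inl (Or.inl h))
        · rcases List.mem_cons.mp hq with rfl | hq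
          · rcases hh with h | h
            · exact Or.inl (Or.inl (Or.inr h))
            · exact Or.inl (Or.inr h)
          · exact Or.inr ⟨q, hq, hh⟩


theorem pv_ofold_nodup (es : List (String × String)) :
    ∀ (o : PySem.Set String), o.Nodup → (es.foldl pvOStep o).Nodup := by
  induction es with
  | nil => intro o h; exact h
  | cons p t ih =>
      intro o h
      exact ih _ (PySem.Set.nodup_add _ _ (PySem.Set.nodup_add _ _ h))


theorem pv_adj_symm (es : List (String × String)) (x y : String)
    (h : pvAdjP es x y) : pvAdjP es y x := by
  rcases h with ⟨p, hp, hh⟩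
  exact ⟨p, hp, by tauto⟩


-- ---- counting lemmas for the fuel arguments ----

theorem pv_mu_le (K s : List String) : pvMu K s ≤ K.length := by
  unfold pvMu
  exact (List.length_filter_le _ _)


theorem pv_mu_nil (K : List String) : pvMu K [] = K.length := by
  unfold pvMu
  simp


theorem pv_mu_append (K s : List String) (x : String)
    (hK : K.Nodup) (hxK : x ∈ K) (hxs : x ∉ s) :
    pvMu K (s ++ [x]) + 1 = pvMu K s := by
  unfold pvMu
  induction K with
  | nil => simp at hxK
  | cons a t ih =>
      have hnt : a ∉ t := (List.nodup_cons.mp hK).1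
      have hK' : t.Nodup := (List.nodup_cons.mp hK).2
      simp only [List.filter_cons]
      by_cases hax : a = x
      · subst hax
        have ht : List.filter (fun k => !(s ++ [a]).contains k) t
            = List.filter (fun k => !s.contains k) t := by
          apply List.filter_congr
          intro k hk
          have hka : k ≠ a := fun h => hnt (h ▸ hk)
          simp [List.contains_eq_mem, hka]
        have h1 : (!(s ++ [a]).contains a) = false := by simp [List.contains_eq_mem]
        have h2 : (!s.contains a) = true := by simp [List.contains_eq_mem, hxs]
        rw [h1, h2, ht]
        simp
      · have hat : x ∈ t := by
          rcases List.mem_cons.mp hxK with h | h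
          · exact absurd h.symm hax
          · exact h
        have key := ih hK' hat
        have hsame : (!(s ++ [x]).contains a) = (!s.contains a) := by
          have : a ≠ x := hax
          simp [List.contains_eq_mem, this]
        rw [hsame]
        split_ifs <;> (try simp only [List.length_cons]) <;> omega


theorem pv_mu_mono (K s t : List String) (h : ∀ k, k ∈ s → k ∈ t) :
    pvMu K t ≤ pvMu K s := by
  unfold pvMu
  rw [← List.countP_eq_length_filter, ← List.countP_eq_length_filter]
  apply List.countP_mono_left
  intro k _ hk
  simp only [Bool.not_eq_eq_eq_not, Bool.not_true, List.contains_eq_mem,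
    decide_eq_false_iff_not] at *
  exact fun hks => hk (h k hks)


-- ---- the inner neighbour-push fold of pvDfs ----

theorem pv_pushFold (K : List String) (hK : K.Nodup) (l : List String) :
    ∀ (seen : PySem.Set String) (stack : List String),
    l.Nodup → (∀ x ∈ l, x ∈ K) → seen.Nodup →
    (∀ x ∈ stack, x ∈ seen) → stack.Nodup →
    (∀ x, x ∈ (l.foldl pvPushStep (seen, stack)).1 ↔ x ∈ seen ∨ x ∈ l) ∧
    (∀ x, x ∈ (l.foldl pvPushStep (seen, stack)).2 ↔ x ∈ stack ∨ (x ∈ l ∧ x ∉ seen)) ∧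
    (l.foldl pvPushStep (seen, stack)).1.Nodup ∧
    (l.foldl pvPushStep (seen, stack)).2.Nodup ∧
    pvMu K (l.foldl pvPushStep (seen, stack)).1
      + (l.foldl pvPushStep (seen, stack)).2.length
      = pvMu K seen + stack.length := by
  induction l with
  | nil =>
      intro seen stack _ _ hsn hsub hstn
      exact ⟨fun x => by simp, fun x => by simp, hsn, hstn, rfl⟩
  | cons ne t ih =>
      intro seen stack hln hlK hsn hsub hstn
      have hnet : ne ∉ t := (List.nodup_cons.mp hln).1
      have htn : t.Nodup := (List.nodup_cons.mp hln).2
      have htK : ∀ x ∈ t, x ∈ K := fun x hx => hlK x (List.mem_cons_of_mem _ hx)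
      simp only [List.foldl_cons]
      by_cases hin : ne ∈ seen
      · have hstep : pvPushStep (seen, stack) ne = (seen, stack) := by
          unfold pvPushStep
          rw [if_pos ((PySem.Set.contains_iff seen ne).mpr hin)]
        rw [hstep]
        obtain ⟨m1, m2, n1, n2, cnt⟩ := ih seen stack htn htK hsn hsub hstn
        refine ⟨fun x => ?_, fun x => ?_, n1, n2, cnt⟩
        · rw [m1]
          simp only [List.mem_cons]
          constructor
          · rintro (h | h)
            · exact Or.inl h
            · exact Or.inr (Or.inr h)
          · rintro (h | rfl | h)
            · exact Or.inl h
            · exact Or.inl hin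
            · exact Or.inr h
        · rw [m2]
          simp only [List.mem_cons]
          constructor
          · rintro (h | ⟨h1, h2⟩)
            · exact Or.inl h
            · exact Or.inr ⟨Or.inr h1, h2⟩
          · rintro (h | ⟨h1 | h1, h2⟩)
            · exact Or.inl h
            · exact absurd (h1 ▸ hin) h2
            · exact Or.inr ⟨h1, h2⟩
      · have hnst : ne ∉ stack := fun h => hin (hsub ne h)
        have hstep : pvPushStep (seen, stack) ne = (seen ++ [ne], ne :: stack) := by
          unfold pvPushStep
          rw [if_neg (fun hc => hin ((PySem.Set.contains_iff seen ne).mp hc))]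
          rw [PySem.Set.add_of_not_mem hin]
        rw [hstep]
        have hsn' : (seen ++ [ne]).Nodup := by
          have := PySem.Set.nodup_add seen ne hsn
          rwa [PySem.Set.add_of_not_mem hin] at this
        have hsub' : ∀ x ∈ ne :: stack, x ∈ seen ++ [ne] := by
          intro x hx
          rcases List.mem_cons.mp hx with rfl | hx
          · simp
          · exact List.mem_append_left _ (hsub x hx)
        have hstn' : (ne :: stack).Nodup := List.nodup_cons.mpr ⟨hnst, hstn⟩
        obtain ⟨m1, m2, n1, n2, cnt⟩ := ih (seen ++ [ne]) (ne :: stack) htn htK hsn' hsub' hstn'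
        have hmu : pvMu K (seen ++ [ne]) + 1 = pvMu K seen :=
          pv_mu_append K seen ne hK (hlK ne (List.mem_cons_self)) hin
        refine ⟨fun x => ?_, fun x => ?_, n1, n2, ?_⟩
        · rw [m1]
          simp only [List.mem_append, List.mem_cons, List.not_mem_nil, or_false]
          tauto
        · rw [m2]
          simp only [List.mem_append, List.mem_cons, List.not_mem_nil, or_false]
          constructor
          · rintro (⟨rfl | h⟩ | ⟨h1, h2⟩)
            · exact Or.inr ⟨Or.inl rfl, hin⟩
            · exact Or.inl h
            · exact Or.inr ⟨Or.inr h1, fun hh => h2 (Or.inl hh)⟩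
          · rintro (h | ⟨rfl | h1, h2⟩)
            · exact Or.inl (Or.inr h)
            · exact Or.inl (Or.inl rfl)
            · by_cases hxne : x = ne
              · exact Or.inl (Or.inl hxne)
              · exact Or.inr ⟨h1, fun hh => hh.elim h2 hxne⟩
        · rw [cnt]
          simp only [List.length_cons]
          omega


-- ---- DFS main invariant ----

theorem pv_dfs_main (es : List (String × String)) (K : List String) (hK : K.Nodup)
    (G : PySem.Dict String (PySem.Set String))
    (hG : ∀ x y, y ∈ G.getD x [] ↔ pvAdjP es x y)
    (hGn : ∀ x, (G.getD x []).Nodup)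
    (hKadj : ∀ x y, pvAdjP es x y → x ∈ K ∧ y ∈ K)
    (S0 : PySem.Set String) (e : String) :
    ∀ (fuel : Nat) (stack : List String) (seen : PySem.Set String) (comp : List String),
    pvMu K seen + stack.length ≤ fuel →
    stack.Nodup → (∀ x ∈ stack, x ∈ seen) →
    comp.Nodup → (∀ x ∈ comp, x ∈ seen ∧ x ∉ stack) →
    (∀ x ∈ seen, x ∈ S0 ∨ x ∈ comp ∨ x ∈ stack) →
    (∀ x ∈ comp, ∀ y, pvAdjP es x y → y ∈ seen) →
    (∀ x, (x ∈ stack ∨ x ∈ comp) → pvReach es e x) →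
    seen.Nodup →
    (∀ x ∈ S0, x ∈ seen ∧ x ∉ stack ∧ x ∉ comp) →
    (e ∈ stack ∨ e ∈ comp) →
    ((∀ x, x ∈ (pvDfs G fuel stack seen comp).1 ↔
        x ∈ S0 ∨ x ∈ (pvDfs G fuel stack seen comp).2) ∧
     (pvDfs G fuel stack seen comp).1.Nodup ∧
     (pvDfs G fuel stack seen comp).2.Nodup ∧
     (∀ x ∈ (pvDfs G fuel stack seen comp).2, pvReach es e x) ∧
     (∀ x ∈ (pvDfs G fuel stack seen comp).2, ∀ y, pvAdjP es x y →
        y ∈ (pvDfs G fuel stack seen comp).1) ∧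
     (∀ x ∈ S0, x ∉ (pvDfs G fuel stack seen comp).2) ∧
     e ∈ (pvDfs G fuel stack seen comp).2) := by
  intro fuel
  induction fuel with
  | zero =>
      intro stack seen comp h1 h2 h3 h4 h5 h6 h7 h8 h9 h10 h11
      have hstack : stack = [] := by
        cases stack with
        | nil => rfl
        | cons a t => simp at h1
      subst hstack
      refine ⟨fun x => ⟨fun hx => ?_, fun hx => ?_⟩, h9, h4, fun x hx => h8 x (Or.inr hx),
        fun x hx y hy => h7 x hx y hy, fun x hx => (h10 x hx).2.2, ?_⟩
      · rcases h6 x hx with h | h | h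
        · exact Or.inl h
        · exact Or.inr h
        · simp at h
      · rcases hx with hx | hx
        · exact (h10 x hx).1
        · exact (h5 x hx).1
      · rcases h11 with h | h
        · simp at h
        · exact h
  | succ fuel ih =>
      intro stack seen comp h1 h2 h3 h4 h5 h6 h7 h8 h9 h10 h11
      cases stack with
      | nil =>
          refine ⟨fun x => ⟨fun hx => ?_, fun hx => ?_⟩, h9, h4, fun x hx => h8 x (Or.inr hx),
            fun x hx y hy => h7 x hx y hy, fun x hx => (h10 x hx).2.2, ?_⟩
          · rcases h6 x hx with h | h | h
            · exact Or.inl h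
            · exact Or.inr h
            · simp at h
          · rcases hx with hx | hx
            · exact (h10 x hx).1
            · exact (h5 x hx).1
          · rcases h11 with h | h
            · simp at h
            · exact h
      | cons item rest =>
          rw [pv_dfs_step]
          have hrestn : rest.Nodup := (List.nodup_cons.mp h2).2
          have hitemrest : item ∉ rest := (List.nodup_cons.mp h2).1
          have hitemseen : item ∈ seen := h3 item List.mem_cons_self
          have hl : G.getD item [] = G.getD item [] := rfl
          have hln : (G.getD item []).Nodup := hGn item
          have hlK : ∀ x ∈ G.getD item [], x ∈ K := by
            intro x hx
            exact (hKadj item x ((hG item x).mp hx)).2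
          have hrsub : ∀ x ∈ rest, x ∈ seen := fun x hx => h3 x (List.mem_cons_of_mem _ hx)
          obtain ⟨m1, m2, n1, n2, cnt⟩ :=
            pv_pushFold K hK (G.getD item []) seen rest hln hlK h9 hrsub hrestn
          have hcompitem : item ∉ comp := by
            intro hc
            exact (h5 item hc).2 List.mem_cons_self
          have hreachitem : pvReach es e item := h8 item (Or.inl List.mem_cons_self)
          -- re-establish every invariant for the recursive call
          apply ih
          · rw [cnt]
            simp only [List.length_cons] at h1
            omega
          · exact n2
          · intro x hx
            rcases (m2 x).mp hx with hx | ⟨hx1, hx2⟩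
            · exact (m1 x).mpr (Or.inl (hrsub x hx))
            · exact (m1 x).mpr (Or.inr hx1)
          · rw [List.nodup_append]
            refine ⟨h4, by simp, ?_⟩
            have : ∀ a ∈ comp, ¬ a = item := fun a ha hai => hcompitem (by rw [← hai]; exact ha)
            simpa [List.Disjoint] using this
          · intro x hx
            rcases List.mem_append.mp hx with hx | hx
            · refine ⟨(m1 x).mpr (Or.inl (h5 x hx).1), fun hst => ?_⟩
              rcases (m2 x).mp hst with hst | ⟨_, hst2⟩
              · exact (h5 x hx).2 (List.mem_cons_of_mem _ hst)
              · exact hst2 (h5 x hx).1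
            · have hxi : x = item := by simpa using hx
              subst hxi
              refine ⟨(m1 x).mpr (Or.inl hitemseen), fun hst => ?_⟩
              rcases (m2 x).mp hst with hst | ⟨_, hst2⟩
              · exact hitemrest hst
              · exact hst2 hitemseen
          · intro x hx
            rcases (m1 x).mp hx with hx | hx
            · rcases h6 x hx with h | h | h
              · exact Or.inl h
              · exact Or.inr (Or.inl (List.mem_append_left _ h))
              · rcases List.mem_cons.mp h with rfl | h
                · exact Or.inr (Or.inl (List.mem_append_right _ (by simp)))
                · exact Or.inr (Or.inr ((m2 x).mpr (Or.inl h)))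
            · by_cases hxs : x ∈ seen
              · rcases h6 x hxs with h | h | h
                · exact Or.inl h
                · exact Or.inr (Or.inl (List.mem_append_left _ h))
                · rcases List.mem_cons.mp h with rfl | h
                  · exact Or.inr (Or.inl (List.mem_append_right _ (by simp)))
                  · exact Or.inr (Or.inr ((m2 x).mpr (Or.inl h)))
              · exact Or.inr (Or.inr ((m2 x).mpr (Or.inr ⟨hx, hxs⟩)))
          · intro x hx y hy
            rcases List.mem_append.mp hx with hx | hx
            · exact (m1 y).mpr (Or.inl (h7 x hx y hy))
            · have hxi : x = item := by simpa using hx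
              subst hxi
              exact (m1 y).mpr (Or.inr ((hG x y).mpr hy))
          · intro x hx
            rcases hx with hx | hx
            · rcases (m2 x).mp hx with hx | ⟨hx1, _⟩
              · exact h8 x (Or.inl (List.mem_cons_of_mem _ hx))
              · exact Relation.ReflTransGen.tail hreachitem ((hG item x).mp hx1)
            · rcases List.mem_append.mp hx with hx | hx
              · exact h8 x (Or.inr hx)
              · have hxi : x = item := by simpa using hx
                subst hxi
                exact hreachitem
          · exact n1
          · intro x hx
            refine ⟨(m1 x).mpr (Or.inl (h10 x hx).1), fun hst => ?_, fun hc => ?_⟩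
            · rcases (m2 x).mp hst with hst | ⟨_, hst2⟩
              · exact (h10 x hx).2.1 (List.mem_cons_of_mem _ hst)
              · exact hst2 (h10 x hx).1
            · rcases List.mem_append.mp hc with hc | hc
              · exact (h10 x hx).2.2 hc
              · have hxi : x = item := by simpa using hc
                exact (h10 x hx).2.1 (by rw [hxi]; exact List.mem_cons_self)
          · rcases h11 with h | h
            · rcases List.mem_cons.mp h with rfl | h
              · exact Or.inr (List.mem_append_right _ (by simp))
              · exact Or.inl ((m2 e).mpr (Or.inl h))
            · exact Or.inr (List.mem_append_left _ h)


theorem pv_dfs_start (es : List (String × String)) (K : List String) (hK : K.Nodup)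
    (G : PySem.Dict String (PySem.Set String))
    (hG : ∀ x y, y ∈ G.getD x [] ↔ pvAdjP es x y)
    (hGn : ∀ x, (G.getD x []).Nodup)
    (hKadj : ∀ x y, pvAdjP es x y → x ∈ K ∧ y ∈ K)
    (S0 : PySem.Set String) (e : String)
    (hS0n : S0.Nodup)
    (hS0c : ∀ x ∈ S0, ∀ y, pvAdjP es x y → y ∈ S0)
    (he : e ∉ S0) (fuel : Nat) (hfuel : K.length + 1 ≤ fuel) :
    (∀ x, x ∈ (pvDfs G fuel [e] (PySem.Set.add S0 e) []).1 ↔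
        x ∈ S0 ∨ pvReach es e x) ∧
    (pvDfs G fuel [e] (PySem.Set.add S0 e) []).1.Nodup ∧
    (pvDfs G fuel [e] (PySem.Set.add S0 e) []).2.Nodup ∧
    (∀ x, x ∈ (pvDfs G fuel [e] (PySem.Set.add S0 e) []).2 ↔ pvReach es e x) := by
  have hadd : PySem.Set.add S0 e = S0 ++ [e] := PySem.Set.add_of_not_mem he
  have h1 : pvMu K (PySem.Set.add S0 e) + 1 ≤ fuel :=
    le_trans (by have := pv_mu_le K (PySem.Set.add S0 e); omega) hfuel
  obtain ⟨A1, A2, A3, A4, A5, A6, A7⟩ :=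
    pv_dfs_main es K hK G hG hGn hKadj S0 e fuel [e] (PySem.Set.add S0 e) []
      (by simpa using h1)
      (by simp)
      (by intro x hx; rw [List.mem_singleton.mp hx]; exact (PySem.Set.mem_add _ _ _).mpr (Or.inr rfl))
      (by simp)
      (by simp)
      (by
        intro x hx
        rcases (PySem.Set.mem_add _ _ _).mp hx with hx | hx
        · exact Or.inl hx
        · exact Or.inr (Or.inr (by simp [hx])))
      (by simp)
      (by
        intro x hx
        rcases hx with hx | hx
        · rw [List.mem_singleton.mp hx]
          exact Relation.ReflTransGen.refl
        · simp at hx)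
      (PySem.Set.nodup_add _ _ hS0n)
      (by
        intro x hx
        refine ⟨(PySem.Set.mem_add _ _ _).mpr (Or.inl hx), ?_, by simp⟩
        intro hc
        rw [List.mem_singleton.mp hc] at hx
        exact he hx)
      (Or.inl (by simp))
  have hreach2 : ∀ x, x ∈ (pvDfs G fuel [e] (PySem.Set.add S0 e) []).2 ↔ pvReach es e x := by
    intro x
    constructor
    · exact fun hx => A4 x hx
    · intro hx
      induction hx with
      | refl => exact A7
      | @tail b c hab hadj ihm =>
          have hc1 := A5 _ ihm _ hadj
          rcases (A1 c).mp hc1 with hc | hc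
          · exfalso
            have hb : b ∈ S0 := hS0c c hc b (pv_adj_symm es b c hadj)
            exact A6 b hb ihm
          · exact hc
  refine ⟨fun x => ⟨fun hx => ?_, fun hx => ?_⟩, A2, A3, hreach2⟩
  · rcases (A1 x).mp hx with h | h
    · exact Or.inl h
    · exact Or.inr ((hreach2 x).mp h)
  · rcases hx with h | h
    · exact (A1 x).mpr (Or.inl h)
    · exact (A1 x).mpr (Or.inr ((hreach2 x).mpr h))


-- ---- closure-side lemmas ----

theorem pv_pass_fold (es : List (String × String)) :
    ∀ (c0 : PySem.Set String) (fl : Bool), c0.Nodup →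
    (c0 <+: (es.foldl pvPStep (c0, fl)).1) ∧
    (es.foldl pvPStep (c0, fl)).1.Nodup ∧
    (∀ x ∈ (es.foldl pvPStep (c0, fl)).1, x ∈ c0 ∨ ∃ p ∈ es, x = p.1 ∨ x = p.2) ∧
    (∀ (R : String → Prop), (∀ x ∈ c0, R x) →
        (∀ x y, R x → pvAdjP es x y → R y) →
        ∀ x ∈ (es.foldl pvPStep (c0, fl)).1, R x) ∧
    ((es.foldl pvPStep (c0, fl)).2 = false →
        (es.foldl pvPStep (c0, fl)).1 = c0 ∧ fl = false ∧
        ∀ p ∈ es, (p.1 ∈ c0 → p.2 ∈ c0) ∧ (p.2 ∈ c0 → p.1 ∈ c0)) ∧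
    ((es.foldl pvPStep (c0, fl)).2 = true →
        fl = true ∨ c0.length < (es.foldl pvPStep (c0, fl)).1.length) := by
  induction es with
  | nil =>
      intro c0 fl hn
      refine ⟨List.prefix_refl _, hn, fun x hx => Or.inl hx, fun R hR _ x hx => hR x hx,
        fun _ => ⟨rfl, ?_, by simp⟩, fun h => Or.inl h⟩
      · simpa using ‹(List.foldl pvPStep (c0, fl) []).2 = false›
  | cons p t ih =>
      intro c0 fl hn
      simp only [List.foldl_cons]
      -- characterize the single step
      obtain ⟨c1, fl1, hstep, hpre1, hn1, hmem1, hR1, hfalse1, htrue1, hsub1⟩ :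
          ∃ c1 fl1, pvPStep (c0, fl) p = (c1, fl1) ∧ (c0 <+: c1) ∧ c1.Nodup ∧
            (∀ x ∈ c1, x ∈ c0 ∨ x = p.1 ∨ x = p.2) ∧
            (∀ (R : String → Prop), (∀ x ∈ c0, R x) →
              (∀ x y, R x → pvAdjP (p :: t) x y → R y) → ∀ x ∈ c1, R x) ∧
            (fl1 = false → c1 = c0 ∧ fl = false ∧
              (p.1 ∈ c0 → p.2 ∈ c0) ∧ (p.2 ∈ c0 → p.1 ∈ c0)) ∧
            (fl1 = true → fl = true ∨ c0.length < c1.length) ∧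
            (∀ x ∈ c0, x ∈ c1) := by
        have hadj1 : pvAdjP (p :: t) p.1 p.2 := ⟨p, List.mem_cons_self, Or.inl ⟨rfl, rfl⟩⟩
        have hadj2 : pvAdjP (p :: t) p.2 p.1 := ⟨p, List.mem_cons_self, Or.inr ⟨rfl, rfl⟩⟩
        by_cases h1 : p.1 ∈ c0 <;> by_cases h2 : p.2 ∈ c0
        · -- both endpoints already in: no change
          have heq : pvPStep (c0, fl) p = (c0, fl) := by
            unfold pvPStep
            simp [h1, h2]
          refine ⟨c0, fl, heq, List.prefix_refl _, hn, fun x hx => Or.inl hx,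
            fun R hR _ x hx => hR x hx, fun hfl => ⟨rfl, hfl, fun _ => h2, fun _ => h1⟩,
            fun h => Or.inl h, fun x hx => hx⟩
        · -- p.1 in, p.2 not: add p.2
          have heq : pvPStep (c0, fl) p = (c0 ++ [p.2], true) := by
            unfold pvPStep
            simp [h1, h2]
          have hnn : (c0 ++ [p.2]).Nodup := by
            have := PySem.Set.nodup_add c0 p.2 hn
            rwa [PySem.Set.add_of_not_mem h2] at this
          refine ⟨c0 ++ [p.2], true, heq, List.prefix_append _ _, hnn, ?_, ?_,
            fun h => by simp at h, fun _ => Or.inr (by simp), fun x hx => List.mem_append_left _ hx⟩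
          · intro x hx
            rcases List.mem_append.mp hx with hx | hx
            · exact Or.inl hx
            · exact Or.inr (Or.inr (by simpa using hx))
          · intro R hR hcl x hx
            rcases List.mem_append.mp hx with hx | hx
            · exact hR x hx
            · have hx2 : x = p.2 := by simpa using hx
              rw [hx2]
              exact hcl p.1 p.2 (hR p.1 h1) hadj1
        · -- p.2 in, p.1 not: add p.1
          have heq : pvPStep (c0, fl) p = (c0 ++ [p.1], true) := by
            unfold pvPStep
            simp [h1, h2]
          have hnn : (c0 ++ [p.1]).Nodup := by
            have := PySem.Set.nodup_add c0 p.1 hn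
            rwa [PySem.Set.add_of_not_mem h1] at this
          refine ⟨c0 ++ [p.1], true, heq, List.prefix_append _ _, hnn, ?_, ?_,
            fun h => by simp at h, fun _ => Or.inr (by simp), fun x hx => List.mem_append_left _ hx⟩
          · intro x hx
            rcases List.mem_append.mp hx with hx | hx
            · exact Or.inl hx
            · exact Or.inr (Or.inl (by simpa using hx))
          · intro R hR hcl x hx
            rcases List.mem_append.mp hx with hx | hx
            · exact hR x hx
            · have hx1 : x = p.1 := by simpa using hx
              rw [hx1]
              exact hcl p.2 p.1 (hR p.2 h2) hadj2
        · -- neither endpoint in: no change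
          have heq : pvPStep (c0, fl) p = (c0, fl) := by
            unfold pvPStep
            simp [h1, h2]
          refine ⟨c0, fl, heq, List.prefix_refl _, hn, fun x hx => Or.inl hx,
            fun R hR _ x hx => hR x hx,
            fun hfl => ⟨rfl, hfl, fun h => absurd h h1, fun h => absurd h h2⟩,
            fun h => Or.inl h, fun x hx => hx⟩
      rw [hstep]
      obtain ⟨ipre, inodup, imem, iR, ifalse, itrue⟩ := ih c1 fl1 hn1
      refine ⟨hpre1.trans ipre, inodup, ?_, ?_, ?_, ?_⟩
      · intro x hx
        rcases imem x hx with hx1 | ⟨q, hq, hh⟩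
        · rcases hmem1 x hx1 with h | h
          · exact Or.inl h
          · exact Or.inr ⟨p, List.mem_cons_self, by tauto⟩
        · exact Or.inr ⟨q, List.mem_cons_of_mem _ hq, hh⟩
      · intro R hR hcl x hx
        have hRc1 : ∀ x ∈ c1, R x := hR1 R hR hcl
        have hclt : ∀ x y, R x → pvAdjP t x y → R y := by
          intro x y hx ⟨q, hq, hh⟩
          exact hcl x y hx ⟨q, List.mem_cons_of_mem _ hq, hh⟩
        exact iR R hRc1 hclt x hx
      · intro hq2
        obtain ⟨he1, he2, he3⟩ := ifalse hq2
        obtain ⟨hc1, hfl, hp1, hp2⟩ := hfalse1 he2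
        subst hc1
        refine ⟨he1, hfl, ?_⟩
        intro q hq
        rcases List.mem_cons.mp hq with rfl | hq
        · exact ⟨hp1, hp2⟩
        · exact he3 q hq
      · intro hq2
        rcases itrue hq2 with h | h
        · rcases htrue1 h with h' | h'
          · exact Or.inl h'
          · exact Or.inr (lt_of_lt_of_le h' ipre.length_le)
        · exact Or.inr (lt_of_le_of_lt hpre1.length_le h)


theorem pv_closure_main (es : List (String × String)) (K : List String) (hK : K.Nodup)
    (hends : ∀ p ∈ es, p.1 ∈ K ∧ p.2 ∈ K) :
    ∀ (fuel : Nat) (comp : PySem.Set String), comp.Nodup →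
    pvMu K comp + 1 ≤ fuel →
    (comp <+: pvClosure es fuel comp) ∧
    (pvClosure es fuel comp).Nodup ∧
    (∀ (R : String → Prop), (∀ x ∈ comp, R x) →
        (∀ x y, R x → pvAdjP es x y → R y) →
        ∀ x ∈ pvClosure es fuel comp, R x) ∧
    (∀ p ∈ es, (p.1 ∈ pvClosure es fuel comp → p.2 ∈ pvClosure es fuel comp) ∧
               (p.2 ∈ pvClosure es fuel comp → p.1 ∈ pvClosure es fuel comp)) := by
  intro fuel
  induction fuel with
  | zero => intro comp _ hb; omega
  | succ fuel ih =>
      intro comp hn hb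
      rw [show pvClosure es (fuel + 1) comp
            = (if (pvPass es comp).2 then pvClosure es fuel (pvPass es comp).1 else comp) from rfl,
          pv_pass_eq]
      obtain ⟨hpre, hnodup, hmem, hR, hfalse, htrue⟩ := pv_pass_fold es comp false hn
      cases hflag : (es.foldl pvPStep (comp, false)).2 with
      | false =>
          simp only [Bool.false_eq_true, if_false]
          obtain ⟨heq, _, hclosed⟩ := hfalse hflag
          exact ⟨List.prefix_refl _, hn, fun R hR _ x hx => hR x hx, hclosed⟩
      | true =>
          rw [if_pos rfl]
          have hgrow : comp.length < (es.foldl pvPStep (comp, false)).1.length := by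
            rcases htrue hflag with h | h
            · exact absurd h (by simp)
            · exact h
          obtain ⟨ext, hext⟩ := hpre
          have hbnd : pvMu K (es.foldl pvPStep (comp, false)).1 + 1 ≤ fuel := by
            cases ext with
            | nil => rw [← hext] at hgrow; simp at hgrow
            | cons a ext' =>
                have haq : a ∈ (es.foldl pvPStep (comp, false)).1 := by
                  rw [← hext]; simp
                have hac : a ∉ comp := by
                  intro hac
                  have hnd : (comp ++ a :: ext').Nodup := by rw [hext]; exact hnodup
                  have hdisj := List.disjoint_of_nodup_append hnd
                  exact hdisj hac (by simp)
                have haK : a ∈ K := by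
                  rcases hmem a haq with h | ⟨q, hq, hh⟩
                  · exact absurd h hac
                  · rcases hh with rfl | rfl
                    · exact (hends q hq).1
                    · exact (hends q hq).2
                have h1 : pvMu K (comp ++ [a]) + 1 = pvMu K comp :=
                  pv_mu_append K comp a hK haK hac
                have h2 : pvMu K (es.foldl pvPStep (comp, false)).1 ≤ pvMu K (comp ++ [a]) := by
                  apply pv_mu_mono
                  intro k hk
                  rw [← hext]
                  rcases List.mem_append.mp hk with hk | hk
                  · exact List.mem_append_left _ hk
                  · exact List.mem_append_right _ (by simpa using Or.inl (by simpa using hk))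
                omega
          obtain ⟨ipre, inodup, iR, iclosed⟩ := ih (es.foldl pvPStep (comp, false)).1 hnodup hbnd
          refine ⟨List.IsPrefix.trans ⟨ext, hext⟩ ipre, inodup, ?_, iclosed⟩
          intro R hRc hcl x hx
          exact iR R (hR R hRc hcl) hcl x hx


theorem pv_closure_start (es : List (String × String)) (K : List String) (hK : K.Nodup)
    (hends : ∀ p ∈ es, p.1 ∈ K ∧ p.2 ∈ K) (e : String) (heK : e ∈ K) :
    (pvClosure es K.length (PySem.Set.ofList [e])).Nodup ∧
    (∀ x, x ∈ pvClosure es K.length (PySem.Set.ofList [e]) ↔ pvReach es e x) := by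
  have hofl : PySem.Set.ofList [e] = [e] := rfl
  have hnil : e ∉ ([] : List String) := by simp
  have hmu : pvMu K ([] ++ [e]) + 1 = pvMu K [] := pv_mu_append K [] e hK heK hnil
  rw [pv_mu_nil] at hmu
  have hbnd : pvMu K [e] + 1 ≤ K.length := by
    simpa using hmu.le
  obtain ⟨hpre, hnodup, hR, hclosed⟩ :=
    pv_closure_main es K hK hends K.length (PySem.Set.ofList [e]) (by rw [hofl]; simp) (by rw [hofl]; exact hbnd)
  refine ⟨hnodup, fun x => ⟨?_, ?_⟩⟩
  · intro hx
    refine hR (pvReach es e) ?_ ?_ x hx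
    · intro y hy
      rw [hofl] at hy
      have : y = e := by simpa using hy
      rw [this]
      exact Relation.ReflTransGen.refl
    · intro a b ha hab
      exact Relation.ReflTransGen.tail ha hab
  · intro hx
    induction hx with
    | refl =>
        rw [hofl] at hpre
        exact hpre.subset (by simp)
    | tail hab hadj ihm =>
        rcases hadj with ⟨q, hq, hh⟩
        rcases hh with ⟨hq1, hq2⟩ | ⟨hq1, hq2⟩
        · rw [← hq2]
          exact (hclosed q hq).1 (by rw [hq1]; exact ihm)
        · rw [← hq1]
          exact (hclosed q hq).2 (by rw [hq2]; exact ihm)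


-- ---- sorted lists of equal nodup element sets agree ----

theorem pv_sorted_eq (xs ys : List String) (hx : xs.Nodup) (hy : ys.Nodup)
    (h : ∀ x, x ∈ xs ↔ x ∈ ys) :
    PySem.List.sorted xs (fun x => x) = PySem.List.sorted ys (fun x => x) := by
  have hyx : ys.Perm xs := (List.perm_ext_iff_of_nodup hy hx).mpr (fun a => (h a).symm)
  have hzp : (PySem.List.sorted ys (fun x => x)).Perm ys := PySem.List.sorted_perm ys _ false
  have hzn : (PySem.List.sorted ys (fun x => x)).Nodup := hzp.nodup_iff.mpr hy
  have hle : (PySem.List.sorted ys (fun x => x)).Pairwise (fun a b => a ≤ b) :=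
    PySem.List.sorted_pairwise ys _
  have hlt : (PySem.List.sorted ys (fun x => x)).Pairwise (fun a b => a < b) := by
    have := hle.and hzn
    exact this.imp (fun hab => lt_of_le_of_ne hab.1 hab.2)
  exact PySem.List.sorted_eq_of_perm_of_pairwise_lt xs _ _ (hzp.trans hyx) hlt


-- ---- the two output folds agree ----

theorem pv_outer (es : List (String × String)) (K : List String) (hK : K.Nodup)
    (G : PySem.Dict String (PySem.Set String))
    (hG : ∀ x y, y ∈ G.getD x [] ↔ pvAdjP es x y)
    (hGn : ∀ x, (G.getD x []).Nodup)
    (hKadj : ∀ x y, pvAdjP es x y → x ∈ K ∧ y ∈ K)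
    (hends : ∀ p ∈ es, p.1 ∈ K ∧ p.2 ∈ K)
    (hsize : G.size = K.length)
    (nm : PySem.Dict String String) :
    ∀ (l : List String), (∀ x ∈ l, x ∈ K) →
    ∀ (sA sB : PySem.Set String) (ans : List (List String)),
    (∀ x, x ∈ sA ↔ x ∈ sB) → sA.Nodup → sB.Nodup →
    (∀ x ∈ sA, ∀ y, pvAdjP es x y → y ∈ sA) →
    (l.foldl
      (fun (st : PySem.Set String × List (List String)) email =>
        if PySem.Set.contains st.1 email then st
        else
          let r := pvDfs G (G.size + 1) [email] (PySem.Set.add st.1 email) []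
          (r.1, st.2 ++ [nm.getD email "" :: PySem.List.sorted r.2 (fun x => x)]))
      (sA, ans)).2
    = (l.foldl
      (fun (st : PySem.Set String × List (List String)) email =>
        if PySem.Set.contains st.1 email then st
        else
          let comp := pvClosure es K.length (PySem.Set.ofList [email])
          (PySem.Set.union st.1 comp,
           st.2 ++ [nm.getD email "" :: PySem.List.sorted comp (fun x => x)]))
      (sB, ans)).2 := by
  intro l
  induction l with
  | nil => intro _ sA sB ans _ _ _ _; rfl
  | cons e t ih =>
      intro hsub sA sB ans hmem hnA hnB hcl
      have hsub' : ∀ x ∈ t, x ∈ K := fun x hx => hsub x (List.mem_cons_of_mem _ hx)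
      simp only [List.foldl_cons]
      by_cases he : e ∈ sA
      · have heB : e ∈ sB := (hmem e).mp he
        rw [if_pos ((PySem.Set.contains_iff sA e).mpr he),
            if_pos ((PySem.Set.contains_iff sB e).mpr heB)]
        exact ih hsub' sA sB ans hmem hnA hnB hcl
      · have heB : e ∉ sB := fun h => he ((hmem e).mpr h)
        rw [if_neg (fun hc => he ((PySem.Set.contains_iff sA e).mp hc)),
            if_neg (fun hc => heB ((PySem.Set.contains_iff sB e).mp hc))]
        have heK : e ∈ K := hsub e List.mem_cons_self
        obtain ⟨D1, D2, D3, D4⟩ :=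
          pv_dfs_start es K hK G hG hGn hKadj sA e hnA hcl he (G.size + 1) (by omega)
        obtain ⟨C1, C2⟩ := pv_closure_start es K hK hends e heK
        have hsort :
            PySem.List.sorted (pvDfs G (G.size + 1) [e] (PySem.Set.add sA e) []).2 (fun x => x)
              = PySem.List.sorted (pvClosure es K.length (PySem.Set.ofList [e])) (fun x => x) :=
          pv_sorted_eq _ _ D3 C1 (fun x => by rw [D4 x, C2 x])
        rw [hsort]
        apply ih hsub'
        · intro x
          rw [D1 x]
          rw [PySem.Set.mem_union sB _ x, C2 x, hmem x]
        · exact D2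
        · exact PySem.Set.nodup_union sB _ hnB
        · intro x hx y hy
          rcases (D1 x).mp hx with h | h
          · exact (D1 y).mpr (Or.inl (hcl x h y hy))
          · exact (D1 y).mpr (Or.inr (Relation.ReflTransGen.tail h hy))


-- ---- main ----

theorem pv_main : ∀ accounts, accountsMerge1 accounts = accountsMerge1_alt accounts := by
  intro accounts
  unfold accountsMerge1 accountsMerge1_alt
  rw [pv_decompA, pv_decompB]
  simp only [List.nil_append]
  have hkeys : ((pvEdgesL accounts).foldl pvGStep PySem.Dict.empty).keys
      = (pvEdgesL accounts).foldl pvOStep PySem.Set.empty := by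
    rw [pv_gfold_keys]
    rfl
  rw [← hkeys]
  have hK : ((pvEdgesL accounts).foldl pvGStep PySem.Dict.empty).keys.Nodup := by
    rw [hkeys]
    exact pv_ofold_nodup _ _ (by simp [PySem.Set.empty])
  have hG : ∀ x y, y ∈ ((pvEdgesL accounts).foldl pvGStep PySem.Dict.empty).getD x []
      ↔ pvAdjP (pvEdgesL accounts) x y := by
    intro x y
    rw [pv_gfold_getD_mem]
    simp [PySem.Dict.getD_empty]
  have hGn : ∀ x, (((pvEdgesL accounts).foldl pvGStep PySem.Dict.empty).getD x []).Nodup := by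
    apply pv_gfold_getD_nodup
    intro x
    simp [PySem.Dict.getD_empty]
  have hKadj : ∀ x y, pvAdjP (pvEdgesL accounts) x y →
      x ∈ ((pvEdgesL accounts).foldl pvGStep PySem.Dict.empty).keys ∧
      y ∈ ((pvEdgesL accounts).foldl pvGStep PySem.Dict.empty).keys := by
    intro x y ⟨p, hp, hh⟩
    rw [hkeys]
    constructor
    · exact (pv_ofold_mem _ _ _).mpr (Or.inr ⟨p, hp, by tauto⟩)
    · exact (pv_ofold_mem _ _ _).mpr (Or.inr ⟨p, hp, by tauto⟩)
  have hends : ∀ p ∈ pvEdgesL accounts,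
      p.1 ∈ ((pvEdgesL accounts).foldl pvGStep PySem.Dict.empty).keys ∧
      p.2 ∈ ((pvEdgesL accounts).foldl pvGStep PySem.Dict.empty).keys := by
    intro p hp
    rw [hkeys]
    exact ⟨(pv_ofold_mem _ _ _).mpr (Or.inr ⟨p, hp, Or.inl rfl⟩),
           (pv_ofold_mem _ _ _).mpr (Or.inr ⟨p, hp, Or.inr rfl⟩)⟩
  have hsize : ((pvEdgesL accounts).foldl pvGStep PySem.Dict.empty).size
      = ((pvEdgesL accounts).foldl pvGStep PySem.Dict.empty).keys.length := by
    simp [PySem.Dict.size, PySem.Dict.keys]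
  exact pv_outer (pvEdgesL accounts) _ hK _ hG hGn hKadj hends hsize
    (accounts.foldl pvNameStep PySem.Dict.empty)
    _ (fun x hx => hx) PySem.Set.empty PySem.Set.empty [] (fun x => Iff.rfl)
    (by simp [PySem.Set.empty]) (by simp [PySem.Set.empty])
    (by intro x hx; simp [PySem.Set.empty] at hx)


-- ===== VERDICT (by name: the statement is the Claim_ definition above) =====
theorem accountsMerge1_spec : Claim_equal_accountsMerge1 := by
  intro accounts _ _
  unfold Spec_accountsMerge1
  exact pv_main accounts
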